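-- pv_equiv track=rewrite | github.com/Sagey133/Bookbot | stats.py | num_words
-- ===== SOURCE A (Python) =====
-- def num_words(book_words):
--     book_list = book_words.split()
--     chars_dict = {}
--     chars = book_words.lower()
--     lower_chars = list(chars)
--     for char in lower_chars:
--         if char in chars_dict:
--             chars_dict[char] += 1
--         else:
--             chars_dict[char] = 1
--     return len(book_list), chars_dict
-- ===== SOURCE B (Python) =====
-- def num_words(book_words):
--     chars = book_words.lower()
--     chars_dict = {c: chars.count(c) for c in dict.fromkeys(chars)}
--     return len(book_words.split()), chars_dict
-- ===== Notes on version B (the rewrite author's own statement) =====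
-- stated objective: faster
-- what changed: A's single accumulator pass that branches on dict membership is replaced by building the distinct characters once (dict.fromkeys) and counting each with a whole-string str.count scan.
import Mathlib
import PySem

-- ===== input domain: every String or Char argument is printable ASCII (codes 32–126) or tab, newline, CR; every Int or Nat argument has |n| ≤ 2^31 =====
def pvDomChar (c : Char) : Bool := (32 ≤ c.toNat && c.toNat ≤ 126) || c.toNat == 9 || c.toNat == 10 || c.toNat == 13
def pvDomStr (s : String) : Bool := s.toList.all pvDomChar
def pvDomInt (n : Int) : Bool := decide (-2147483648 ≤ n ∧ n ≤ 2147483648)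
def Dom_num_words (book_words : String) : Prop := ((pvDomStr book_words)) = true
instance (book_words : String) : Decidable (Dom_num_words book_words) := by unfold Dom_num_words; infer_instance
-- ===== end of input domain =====

-- B builds the distinct characters once and counts each by a whole-string scan,
-- replacing A's single accumulator pass that branches on dict membership (objective: idiomatic).

-- ===== PORT A =====
def num_words (book_words : String) : Int × (List (String × Int)) :=
  let book_list := PySem.Str.split₀ book_words
  let chars := PySem.Str.lower book_words
  -- list(chars): Python iterates the string as 1-character strings
  let lower_chars : List String := chars.toList.map (fun c => String.ofList [c])
  let chars_dict : PySem.Dict String Int :=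
    lower_chars.foldl
      (fun d char =>
        if d.contains char then d.insert char (d.getD char 0 + 1)
        else d.insert char 1)
      PySem.Dict.empty
  ((book_list.length : Int), chars_dict.items)

-- ===== PORT B =====
def num_words_alt (book_words : String) : Int × (List (String × Int)) :=
  let chars := PySem.Str.lower book_words
  let charList : List String := chars.toList.map (fun c => String.ofList [c])
  -- {c: chars.count(c) for c in dict.fromkeys(chars)}
  let chars_dict : List (String × Int) :=
    (PySem.List.dedup charList).map (fun c => (c, (charList.count c : Int)))
  (((PySem.Str.split₀ book_words).length : Int), chars_dict)

-- ===== PRECONDITION & SPEC =====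
def Spec_num_words (book_words : String) (out : Int × (List (String × Int))) : Prop := out = num_words_alt book_words
instance (book_words : String) (out : Int × (List (String × Int))) : Decidable (Spec_num_words book_words out) := by unfold Spec_num_words; infer_instance

-- ===== CLAIM (what is proved, stated in full; the proofs are below) =====
def Claim_equal_num_words : Prop := ∀ (book_words : String), Dom_num_words book_words → Spec_num_words book_words (num_words book_words)

-- ===== LEMMAS AND PROOFS =====

theorem pv_getD_zero_of_not_contains
    (d : PySem.Dict String Int) (k : String) (h : d.contains k = false) : d.getD k 0 = 0 := by
  simp only [PySem.Dict.contains_eq_decide_mem_keys, decide_eq_false_iff_not, PySem.Dict.keys] at h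
  have hf : List.find? (fun p => p.1 == k) d.items = none := by
    rw [List.find?_eq_none]
    intro p hp hpk
    exact h (List.mem_map.mpr ⟨p, hp, by simpa using hpk⟩)
  simp [PySem.Dict.getD, PySem.Dict.get?, hf]

theorem pv_countfold_eq_counter (l : List String) :
    l.foldl
      (fun d char =>
        if d.contains char then d.insert char (d.getD char 0 + 1)
        else d.insert char 1)
      PySem.Dict.empty = PySem.Dict.counter l := by
  rw [← PySem.Dict.foldl_insert_getD_add_one_eq_counter]
  apply PySem.List.foldl_congr_mem
  intro d x _
  by_cases h : d.contains x = true
  · simp [h]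
  · simp only [Bool.not_eq_true] at h
    simp [h, pv_getD_zero_of_not_contains d x h]

-- ===== VERDICT (by name: the statement is the Claim_ definition above) =====
theorem num_words_spec : Claim_equal_num_words := by
  intro bw _
  unfold Spec_num_words num_words num_words_alt
  simp only [pv_countfold_eq_counter, PySem.Dict.items_counter, PySem.List.dedup_eq_ofList]
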